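-- pv_equiv track=rewrite | github.com/colearbuckle/FileShare | Baseband_Unit_Prototype_3/baseband_unit_generator_v18.py | build_sch
-- ===== SOURCE A (Python) =====
-- def gsm_conv_encode(bits):
--     G0 = 0o133
--     G1 = 0o171
--     shift = [0]*5
--     encoded = []
--     bits = bits + [0,0,0,0]
--
--     for bit in bits:
--         shift = [bit] + shift[:-1]
--
--         def parity(poly):
--             p = 0
--             for i in range(5):
--                 if (poly >> i) & 1:
--                     p ^= shift[i]
--             return p
--
--         encoded.append(parity(G0))
--         encoded.append(parity(G1))
--
--     return encoded
--
-- def fire_code(bits):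
--     g = [1,0,1,0,0,1,1,0,1,0,1]
--     reg = bits + [0]*10
--
--     for i in range(len(bits)):
--         if reg[i] == 1:
--             for j in range(len(g)):
--                 reg[i+j] ^= g[j]
--
--     return bits + reg[-10:]
--
-- def build_sch(FN, BSIC=0):
--     T1 = FN // (26 * 51)
--     T2 = FN % 26
--     T3 = FN % 51
--     T3p = T3 // 10
--
--     fn_bits = (
--         [(T1 >> i) & 1 for i in reversed(range(11))] +
--         [(T2 >> i) & 1 for i in reversed(range(5))] +
--         [(T3p >> i) & 1 for i in reversed(range(3))]
--     )
--
--     bsic_bits = [(BSIC >> i) & 1 for i in reversed(range(6))]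
--
--     info = fn_bits + bsic_bits
--     fire = fire_code(info)
--     encoded = gsm_conv_encode(fire)
--
--     burst = [0,0,0] + encoded
--     if len(burst) < 148:
--         burst += [0]*(148-len(burst))
--
--     return burst[:148]
-- ===== SOURCE B (Python) =====
-- # B: fire code computed by a 10-bit LFSR consuming one info bit at a time (no length-(n+10)
-- # scratch array, no nested tap loop over a mutable prefix) and a table-driven rate-1/2
-- # convolutional encoder over a 5-bit integer state; pad/truncate done by one slice.
--
-- # LFSR feedback taps = fire generator g[1:]
-- _TAPS = [0, 1, 0, 0, 1, 1, 0, 1, 0, 1]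
-- # per-state parity tables for the two convolutional outputs (state bit 0 = newest bit)
-- _OUT0 = [0, 1, 1, 0, 0, 1, 1, 0, 1, 0, 0, 1, 1, 0, 0, 1,
--          1, 0, 0, 1, 1, 0, 0, 1, 0, 1, 1, 0, 0, 1, 1, 0]
-- _OUT1 = [0, 1, 0, 1, 0, 1, 0, 1, 1, 0, 1, 0, 1, 0, 1, 0,
--          1, 0, 1, 0, 1, 0, 1, 0, 0, 1, 0, 1, 0, 1, 0, 1]
--
-- def build_sch(FN, BSIC=0):
--     T1 = FN // (26 * 51)
--     T2 = FN % 26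
--     T3 = FN % 51
--     T3p = T3 // 10
--
--     info = (
--         [(T1 >> i) & 1 for i in reversed(range(11))] +
--         [(T2 >> i) & 1 for i in reversed(range(5))] +
--         [(T3p >> i) & 1 for i in reversed(range(3))] +
--         [(BSIC >> i) & 1 for i in reversed(range(6))]
--     )
--
--     # fire code: CRC remainder via LFSR
--     r = [0] * 10
--     for bit in info:
--         fb = bit ^ r[0]
--         r = r[1:] + [0]
--         if fb == 1:
--             r = [x ^ t for x, t in zip(r, _TAPS)]
--     fire = info + r
--
--     # convolutional encoder, table-driven
--     encoded = []
--     state = 0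
--     for bit in fire + [0, 0, 0, 0]:
--         state = (state * 2 + bit) % 32
--         encoded.append(_OUT0[state])
--         encoded.append(_OUT1[state])
--
--     return ([0, 0, 0] + encoded + [0] * 148)[:148]
-- ===== Notes on version B (the rewrite author's own statement) =====
-- stated objective: alternative
-- what changed: fire_code's in-place long division over an (n+10)-cell scratch array with a nested 11-tap inner loop is replaced by a 10-bit LFSR that consumes one info bit at a time, and gsm_conv_encode's per-bit 5-cell shift list with an inner parity loop over the polynomial bits is replaced by a table-driven encoder that keeps the state as one integer and looks the two output bits up in precomputed 32-entry tables.
import Mathlib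
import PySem

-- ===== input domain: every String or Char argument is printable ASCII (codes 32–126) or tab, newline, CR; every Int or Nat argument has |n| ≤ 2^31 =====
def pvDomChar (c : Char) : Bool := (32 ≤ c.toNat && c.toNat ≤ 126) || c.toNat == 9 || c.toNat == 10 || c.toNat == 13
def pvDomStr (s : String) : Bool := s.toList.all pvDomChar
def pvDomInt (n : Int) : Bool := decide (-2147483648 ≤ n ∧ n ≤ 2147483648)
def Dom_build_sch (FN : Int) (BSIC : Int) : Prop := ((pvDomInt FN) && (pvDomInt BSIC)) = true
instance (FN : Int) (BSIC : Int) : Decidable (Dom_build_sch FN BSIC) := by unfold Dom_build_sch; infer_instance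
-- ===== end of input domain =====

-- B replaces A's fire-code long division over an (n+10)-cell scratch array by a 10-bit LFSR
-- consuming one bit at a time, and A's shift-list convolutional encoder by a table-driven
-- encoder over a 5-bit integer state (objective: alternative; same exact output).

-- ===== PORT A =====

-- (x >> i) & 1 : Python shift and mask, exact on negatives (>>> on Int floors; band is Python &)
def pvBit (x : Int) (i : Nat) : Int := PySem.Int.band (x >>> i) 1

-- fire-code generator g (A's literal list)
def pvG : List Int := [1, 0, 1, 0, 0, 1, 1, 0, 1, 0, 1]

-- A's inner helper `parity(poly)`: p ^= shift[i] for each set bit i of poly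
-- (shift[i] is always in range: the shift register always has 5 cells, i < 5)
def gsm_parity (shift : List Int) (poly : Nat) : Int :=
  (List.range 5).foldl
    (fun p i => if (poly >>> i) &&& 1 == 1 then PySem.Int.bxor p (shift.getD i 0) else p) 0

-- gsm_conv_encode: shift = [bit] + shift[:-1]; append parity(G0), parity(G1)  (G0 = 0o133 = 91, G1 = 0o171 = 121)
def gsm_conv_encode (bits : List Int) : List Int :=
  ((bits ++ [0, 0, 0, 0]).foldl
      (fun (st : List Int × List Int) bit =>
        let shift := bit :: st.1.dropLast
        (shift, st.2 ++ [gsm_parity shift 91, gsm_parity shift 121]))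
      ([0, 0, 0, 0, 0], ([] : List Int))).2

-- fire_code: long division in place over reg = bits + [0]*10
-- (indices i and i+j are always in range: i < len(bits), j < 11, len(reg) = len(bits) + 10)
def fire_code (bits : List Int) : List Int :=
  let reg :=
    (List.range bits.length).foldl
      (fun reg i =>
        if reg.getD i 0 == 1 then
          (List.range pvG.length).foldl
            (fun r j => r.set (i + j) (PySem.Int.bxor (r.getD (i + j) 0) (pvG.getD j 0))) reg
        else reg)
      (bits ++ List.replicate 10 0)
  bits ++ PySem.List.slice reg (some (-10)) none    -- reg[-10:]

def build_sch (FN : Int) (BSIC : Int) : List Int :=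
  let T1 := PySem.Int.floordiv FN (26 * 51)
  let T2 := PySem.Int.mod FN 26
  let T3 := PySem.Int.mod FN 51
  let T3p := PySem.Int.floordiv T3 10
  let fn_bits :=
    ((List.range 11).reverse.map (fun i => pvBit T1 i)) ++
    ((List.range 5).reverse.map (fun i => pvBit T2 i)) ++
    ((List.range 3).reverse.map (fun i => pvBit T3p i))
  let bsic_bits := (List.range 6).reverse.map (fun i => pvBit BSIC i)
  let info := fn_bits ++ bsic_bits
  let fire := fire_code info
  let encoded := gsm_conv_encode fire
  let burst := [0, 0, 0] ++ encoded
  let burst := if burst.length < 148 then burst ++ List.replicate (148 - burst.length) 0 else burst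
  burst.take 148    -- burst[:148]

-- ===== PORT B =====

-- LFSR feedback taps = fire generator g[1:]
def pvTaps : List Int := [0, 1, 0, 0, 1, 1, 0, 1, 0, 1]

-- per-state parity tables for the two convolutional outputs (state bit 0 = newest bit)
def pvOut0 : List Int :=
  [0, 1, 1, 0, 0, 1, 1, 0, 1, 0, 0, 1, 1, 0, 0, 1,
   1, 0, 0, 1, 1, 0, 0, 1, 0, 1, 1, 0, 0, 1, 1, 0]
def pvOut1 : List Int :=
  [0, 1, 0, 1, 0, 1, 0, 1, 1, 0, 1, 0, 1, 0, 1, 0,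
   1, 0, 1, 0, 1, 0, 1, 0, 0, 1, 0, 1, 0, 1, 0, 1]

-- B's fire loop: r holds the CRC remainder (r[0] is always present: the register has 10 cells)
def fire_lfsr (info : List Int) : List Int :=
  info.foldl
    (fun r bit =>
      let fb := PySem.Int.bxor bit (r.getD 0 0)
      let r := r.drop 1 ++ [0]
      if fb == 1 then List.zipWith (fun x t => PySem.Int.bxor x t) r pvTaps else r)
    (List.replicate 10 0)

-- B's convolutional loop: state = (state*2 + bit) % 32; outputs looked up in the tables
-- (state is always in [0, 32), so the Int index state.toNat is in range)
def conv_table (bits : List Int) : List Int :=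
  ((bits ++ [0, 0, 0, 0]).foldl
      (fun (st : Int × List Int) bit =>
        let s := PySem.Int.mod (st.1 * 2 + bit) 32
        (s, st.2 ++ [pvOut0.getD s.toNat 0, pvOut1.getD s.toNat 0]))
      ((0 : Int), ([] : List Int))).2

def build_sch_alt (FN : Int) (BSIC : Int) : List Int :=
  let T1 := PySem.Int.floordiv FN (26 * 51)
  let T2 := PySem.Int.mod FN 26
  let T3 := PySem.Int.mod FN 51
  let T3p := PySem.Int.floordiv T3 10
  let info :=
    ((List.range 11).reverse.map (fun i => pvBit T1 i)) ++
    ((List.range 5).reverse.map (fun i => pvBit T2 i)) ++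
    ((List.range 3).reverse.map (fun i => pvBit T3p i)) ++
    ((List.range 6).reverse.map (fun i => pvBit BSIC i))
  let fire := info ++ fire_lfsr info
  let encoded := conv_table fire
  (([0, 0, 0] ++ encoded) ++ List.replicate 148 0).take 148

-- ===== PRECONDITION & SPEC =====
def Spec_build_sch (FN : Int) (BSIC : Int) (out : List Int) : Prop := out = build_sch_alt FN BSIC
instance (FN : Int) (BSIC : Int) (out : List Int) : Decidable (Spec_build_sch FN BSIC out) := by unfold Spec_build_sch; infer_instance

-- ===== CLAIM (what is proved, stated in full; the proofs are below) =====
def Claim_equal_build_sch : Prop := ∀ (FN : Int) (BSIC : Int), Dom_build_sch FN BSIC → Spec_build_sch FN BSIC (build_sch FN BSIC)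

-- ===== LEMMAS AND PROOFS =====

-- all values flowing through both pipelines are 0/1 bits
def is01 (l : List Int) : Prop := ∀ x ∈ l, x = 0 ∨ x = 1

-- xor-overlay of a tap list onto the front of a data list (proof-side view of both registers)
def overlay : List Int → List Int → List Int
  | [], xs => xs
  | _ :: _, [] => []
  | t :: ts, x :: xs => PySem.Int.bxor x t :: overlay ts xs

-- named views of the four fold bodies (definitionally equal to the lambdas in the ports)
def AfireBody (reg : List Int) (i : Nat) : List Int :=
  if reg.getD i 0 == 1 then
    (List.range pvG.length).foldl
      (fun r j => r.set (i + j) (PySem.Int.bxor (r.getD (i + j) 0) (pvG.getD j 0))) reg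
  else reg

def BfireBody (r : List Int) (bit : Int) : List Int :=
  let fb := PySem.Int.bxor bit (r.getD 0 0)
  let r := r.drop 1 ++ [0]
  if fb == 1 then List.zipWith (fun x t => PySem.Int.bxor x t) r pvTaps else r

def AconvBody (st : List Int × List Int) (bit : Int) : List Int × List Int :=
  let shift := bit :: st.1.dropLast
  (shift, st.2 ++ [gsm_parity shift 91, gsm_parity shift 121])

def BconvBody (st : Int × List Int) (bit : Int) : Int × List Int :=
  let s := PySem.Int.mod (st.1 * 2 + bit) 32
  (s, st.2 ++ [pvOut0.getD s.toNat 0, pvOut1.getD s.toNat 0])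

lemma fire_code_def (bits : List Int) :
    fire_code bits =
      bits ++ PySem.List.slice
        ((List.range bits.length).foldl AfireBody (bits ++ List.replicate 10 0))
        (some (-10)) none := rfl

lemma fire_lfsr_def (info : List Int) :
    fire_lfsr info = info.foldl BfireBody (List.replicate 10 0) := rfl

lemma gsm_conv_encode_def (bits : List Int) :
    gsm_conv_encode bits = ((bits ++ [0, 0, 0, 0]).foldl AconvBody ([0, 0, 0, 0, 0], ([] : List Int))).2 := rfl

lemma conv_table_def (bits : List Int) :
    conv_table bits = ((bits ++ [0, 0, 0, 0]).foldl BconvBody ((0 : Int), ([] : List Int))).2 := rfl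

-- 0/1 bit facts
lemma pvBit_01 (x : Int) (i : Nat) : pvBit x i = 0 ∨ pvBit x i = 1 := by
  unfold pvBit
  rw [PySem.Int.band_one]
  have h1 := PySem.Int.mod_nonneg (x >>> i) (by norm_num : (0:Int) < 2)
  have h2 := PySem.Int.mod_lt (x >>> i) (by norm_num : (0:Int) < 2)
  omega

lemma bxor_01 {a b : Int} (ha : a = 0 ∨ a = 1) (hb : b = 0 ∨ b = 1) :
    PySem.Int.bxor a b = 0 ∨ PySem.Int.bxor a b = 1 := by
  rcases ha with rfl | rfl <;> rcases hb with rfl | rfl <;> decide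

lemma bxor_assoc_01 {a b c : Int} (ha : a = 0 ∨ a = 1) (hb : b = 0 ∨ b = 1) (hc : c = 0 ∨ c = 1) :
    PySem.Int.bxor (PySem.Int.bxor a b) c = PySem.Int.bxor a (PySem.Int.bxor b c) := by
  rcases ha with rfl | rfl <;> rcases hb with rfl | rfl <;> rcases hc with rfl | rfl <;> decide

lemma is01_append {l₁ l₂ : List Int} (h₁ : is01 l₁) (h₂ : is01 l₂) : is01 (l₁ ++ l₂) := by
  intro x hx; rcases List.mem_append.mp hx with h | h; exact h₁ x h; exact h₂ x h

lemma is01_map_pvBit (t : Int) (l : List Nat) : is01 (l.map (fun i => pvBit t i)) := by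
  intro x hx; obtain ⟨i, _, rfl⟩ := List.mem_map.mp hx; exact pvBit_01 t i

-- overlay basics
lemma length_overlay : ∀ (ts xs : List Int), (overlay ts xs).length = xs.length := by
  intro ts
  induction ts with
  | nil => intro xs; rfl
  | cons t ts ih =>
    intro xs
    cases xs with
    | nil => rfl
    | cons x xs => simp [overlay, ih]

lemma is01_overlay : ∀ {ts xs : List Int}, is01 ts → is01 xs → is01 (overlay ts xs) := by
  intro ts
  induction ts with
  | nil => intro xs _ hxs; exact hxs
  | cons t ts ih =>
    intro xs hts hxs
    cases xs with
    | nil => intro y hy; simp [overlay] at hy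
    | cons x xs =>
      intro y hy
      simp only [overlay, List.mem_cons] at hy
      rcases hy with rfl | hy
      · exact bxor_01 (hxs x (by simp)) (hts t (by simp))
      · exact ih (fun z hz => hts z (by simp [hz])) (fun z hz => hxs z (by simp [hz])) y hy

lemma overlay_zeros : ∀ (n : Nat) (xs : List Int), overlay (List.replicate n 0) xs = xs := by
  intro n
  induction n with
  | zero => intro xs; rfl
  | succ n ih =>
    intro xs
    cases xs with
    | nil => simp [List.replicate_succ, overlay]
    | cons x xs => simp [List.replicate_succ, overlay, ih, PySem.Int.bxor_zero]

lemma overlay_self_zeros : ∀ (ts : List Int), overlay ts (List.replicate ts.length 0) = ts := by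
  intro ts
  induction ts with
  | nil => rfl
  | cons t ts ih =>
    show PySem.Int.bxor 0 t :: overlay ts (List.replicate ts.length 0) = t :: ts
    rw [PySem.Int.bxor_comm, PySem.Int.bxor_zero, ih]

lemma overlay_append_zero : ∀ (ts xs : List Int), ts.length < xs.length →
    overlay (ts ++ [0]) xs = overlay ts xs := by
  intro ts
  induction ts with
  | nil =>
    intro xs h
    cases xs with
    | nil => simp at h
    | cons x xs =>
      show PySem.Int.bxor x 0 :: overlay [] xs = x :: xs
      rw [PySem.Int.bxor_zero]; rfl
  | cons t ts ih =>
    intro xs h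
    cases xs with
    | nil => simp at h
    | cons x xs =>
      show PySem.Int.bxor x t :: overlay (ts ++ [0]) xs = PySem.Int.bxor x t :: overlay ts xs
      rw [ih xs (by simpa using h)]

lemma overlay_nil_right : ∀ (ts : List Int), overlay ts [] = [] := by
  intro ts; cases ts <;> rfl

lemma overlay_overlay : ∀ (b a xs : List Int), is01 a → is01 b → is01 xs →
    b.length ≤ a.length → overlay a (overlay b xs) = overlay (overlay b a) xs := by
  intro b
  induction b with
  | nil => intro a xs _ _ _ _; rfl
  | cons t ts ih =>
    intro a xs ha hb hxs hlen
    cases a with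
    | nil => simp at hlen
    | cons s ss =>
      cases xs with
      | nil => rw [overlay_nil_right, overlay_nil_right, overlay_nil_right]
      | cons x xs =>
        show PySem.Int.bxor (PySem.Int.bxor x t) s :: overlay ss (overlay ts xs)
           = PySem.Int.bxor x (PySem.Int.bxor s t) :: overlay (overlay ts ss) xs
        have hx := hxs x (by simp)
        have ht := hb t (by simp)
        have hs := ha s (by simp)
        congr 1
        · rw [bxor_assoc_01 hx ht hs, PySem.Int.bxor_comm t s]
        · exact ih ss xs (fun z hz => ha z (by simp [hz])) (fun z hz => hb z (by simp [hz]))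
            (fun z hz => hxs z (by simp [hz])) (by simpa using hlen)

lemma zipWith_bxor_eq_overlay : ∀ (xs ts : List Int), xs.length + 1 = ts.length →
    List.zipWith (fun x t => PySem.Int.bxor x t) (xs ++ [0]) ts = overlay xs ts := by
  intro xs
  induction xs with
  | nil =>
    intro ts h
    match ts, h with
    | [t], _ =>
      show [PySem.Int.bxor 0 t] = [t]
      rw [PySem.Int.bxor_comm, PySem.Int.bxor_zero]
  | cons x xs ih =>
    intro ts h
    cases ts with
    | nil => simp at h
    | cons t ts =>
      show PySem.Int.bxor x t :: List.zipWith (fun x t => PySem.Int.bxor x t) (xs ++ [0]) ts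
         = PySem.Int.bxor t x :: overlay xs ts
      rw [PySem.Int.bxor_comm x t, ih ts (by simpa using h)]

lemma overlay_getD_ge : ∀ (ts xs : List Int) (m : Nat), ts.length ≤ m →
    (overlay ts xs).getD m 0 = xs.getD m 0 := by
  intro ts
  induction ts with
  | nil => intro xs m _; rfl
  | cons t ts ih =>
    intro xs m h
    cases xs with
    | nil => rw [overlay_nil_right]
    | cons x xs =>
      cases m with
      | zero => simp at h
      | succ m =>
        show (PySem.Int.bxor x t :: overlay ts xs).getD (m + 1) 0 = (x :: xs).getD (m + 1) 0
        rw [List.getD_cons_succ, List.getD_cons_succ]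
        exact ih xs m (by simp at h; omega)

lemma overlay_set : ∀ (ts xs : List Int) (c : Int) (m : Nat), m = ts.length → ts.length < xs.length →
    (overlay ts xs).set m (PySem.Int.bxor (xs.getD m 0) c) = overlay (ts ++ [c]) xs := by
  intro ts
  induction ts with
  | nil =>
    intro xs c m hm h
    subst hm
    cases xs with
    | nil => simp at h
    | cons x xs =>
      show (x :: xs).set 0 (PySem.Int.bxor ((x :: xs).getD 0 0) c) = PySem.Int.bxor x c :: overlay [] xs
      rw [List.getD_cons_zero, List.set_cons_zero]; rfl
  | cons t ts ih =>
    intro xs c m hm h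
    subst hm
    cases xs with
    | nil => simp at h
    | cons x xs =>
      show (PySem.Int.bxor x t :: overlay ts xs).set (ts.length + 1)
            (PySem.Int.bxor ((x :: xs).getD (ts.length + 1) 0) c)
          = PySem.Int.bxor x t :: overlay (ts ++ [c]) xs
      rw [List.getD_cons_succ, List.set_cons_succ]
      rw [ih xs c ts.length rfl (by simpa using h)]

-- the inner tap loop at offset 0 is an overlay of pvG
lemma inner_fold_range : ∀ (m : Nat) (reg : List Int), m ≤ pvG.length → m ≤ reg.length →
    (List.range m).foldl (fun r j => r.set j (PySem.Int.bxor (r.getD j 0) (pvG.getD j 0))) reg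
      = overlay (pvG.take m) reg := by
  intro m
  induction m with
  | zero => intro reg _ _; rfl
  | succ m ih =>
    intro reg h1 h2
    rw [List.range_succ, List.foldl_append, ih reg (by omega) (by omega)]
    simp only [List.foldl_cons, List.foldl_nil]
    rw [overlay_getD_ge _ reg m (by rw [List.length_take]; omega)]
    rw [overlay_set (pvG.take m) reg (pvG.getD m 0) m (by rw [List.length_take]; omega)
        (by rw [List.length_take]; omega)]
    congr 1
    rw [List.take_add_one, List.getElem?_eq_getElem (by omega : m < pvG.length),
        List.getD_eq_getElem pvG 0 (by omega : m < pvG.length)]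
    rfl

-- peeling one untouched head cell off the register
lemma inner_peel : ∀ (L : List Nat) (i : Nat) (x : Int) (xs : List Int),
    L.foldl (fun r j => r.set (i + 1 + j) (PySem.Int.bxor (r.getD (i + 1 + j) 0) (pvG.getD j 0))) (x :: xs)
      = x :: L.foldl (fun r j => r.set (i + j) (PySem.Int.bxor (r.getD (i + j) 0) (pvG.getD j 0))) xs := by
  intro L i
  induction L with
  | nil => intro x xs; rfl
  | cons j L ih =>
    intro x xs
    simp only [List.foldl_cons]
    have h1 : i + 1 + j = (i + j) + 1 := by omega
    rw [h1, List.getD_cons_succ, List.set_cons_succ]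
    exact ih _ _

lemma AfireBody_peel (i : Nat) (x : Int) (xs : List Int) :
    AfireBody (x :: xs) (i + 1) = x :: AfireBody xs i := by
  unfold AfireBody
  rw [List.getD_cons_succ]
  split
  · exact inner_peel _ i x xs
  · rfl

lemma outer_peel : ∀ (L : List Nat) (x : Int) (xs : List Int),
    L.foldl (fun reg i => AfireBody reg (i + 1)) (x :: xs) = x :: L.foldl AfireBody xs := by
  intro L
  induction L with
  | nil => intro x xs; rfl
  | cons i L ih =>
    intro x xs
    simp only [List.foldl_cons]
    rw [AfireBody_peel]
    exact ih _ _

-- B-register invariants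
lemma BfireBody_length {r : List Int} (b : Int) (h : r.length = 10) : (BfireBody r b).length = 10 := by
  unfold BfireBody
  dsimp only
  split <;> simp [List.length_zipWith, h, pvTaps]

lemma Bfold_length : ∀ (bs : List Int) (r : List Int), r.length = 10 →
    (bs.foldl BfireBody r).length = 10 := by
  intro bs
  induction bs with
  | nil => intro r h; exact h
  | cons b bs ih => intro r h; exact ih _ (BfireBody_length b h)

lemma is01_zipWith_bxor : ∀ (xs ts : List Int), is01 xs → is01 ts →
    is01 (List.zipWith (fun x t => PySem.Int.bxor x t) xs ts) := by
  intro xs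
  induction xs with
  | nil => intro ts _ _ y hy; simp at hy
  | cons x xs ih =>
    intro ts hxs hts
    cases ts with
    | nil => intro y hy; simp at hy
    | cons t ts =>
      intro y hy
      simp only [List.zipWith_cons_cons, List.mem_cons] at hy
      rcases hy with rfl | hy
      · exact bxor_01 (hxs x (by simp)) (hts t (by simp))
      · exact ih ts (fun z hz => hxs z (by simp [hz])) (fun z hz => hts z (by simp [hz])) y hy

lemma is01_drop_append_zero {r : List Int} (hr : is01 r) : is01 (r.drop 1 ++ [0]) := by
  intro y hy
  rcases List.mem_append.mp hy with h | h
  · exact hr y (List.mem_of_mem_drop h)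
  · left; simpa using h

lemma BfireBody_is01 {r : List Int} {b : Int} (hr : is01 r) :
    is01 (BfireBody r b) := by
  unfold BfireBody
  dsimp only
  split
  · exact is01_zipWith_bxor _ _ (is01_drop_append_zero hr) (by unfold is01 pvTaps; decide)
  · exact is01_drop_append_zero hr

lemma Bfold_is01 : ∀ (bs : List Int) (r : List Int), is01 bs → is01 r →
    is01 (bs.foldl BfireBody r) := by
  intro bs
  induction bs with
  | nil => intro r _ hr; exact hr
  | cons b bs ih =>
    intro r hbs hr
    exact ih _ (fun z hz => hbs z (by simp [hz])) (BfireBody_is01 hr)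

-- the fire main loop: A's register fold is junk ++ B's LFSR state
lemma fire_loop : ∀ (bs r : List Int), r.length = 10 → is01 bs → is01 r →
    ∃ junk : List Int, junk.length = bs.length ∧
      (List.range bs.length).foldl AfireBody (overlay r (bs ++ List.replicate 10 0))
        = junk ++ bs.foldl BfireBody r := by
  intro bs
  induction bs with
  | nil =>
    intro r hlen _ _
    refine ⟨[], rfl, ?_⟩
    show overlay r ([] ++ List.replicate 10 0) = r
    rw [List.nil_append, ← hlen]
    exact overlay_self_zeros r
  | cons b bs ih =>
    intro r hlen h01bs h01r
    obtain ⟨r0, rs, rfl⟩ : ∃ r0 rs, r = r0 :: rs := by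
      cases r with
      | nil => simp at hlen
      | cons r0 rs => exact ⟨_, _, rfl⟩
    have hrs : rs.length = 9 := by simp at hlen; omega
    have hb : b = 0 ∨ b = 1 := h01bs b (by simp)
    have h01bs' : is01 bs := fun z hz => h01bs z (by simp [hz])
    have hr0 : r0 = 0 ∨ r0 = 1 := h01r r0 (by simp)
    have h01rs : is01 rs := fun z hz => h01r z (by simp [hz])
    have h01X : is01 (bs ++ List.replicate 10 0) :=
      is01_append h01bs' (fun z hz => Or.inl (List.eq_of_mem_replicate hz))
    have hreg : overlay (r0 :: rs) ((b :: bs) ++ List.replicate 10 0)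
        = PySem.Int.bxor b r0 :: overlay rs (bs ++ List.replicate 10 0) := rfl
    have hc01 : PySem.Int.bxor b r0 = 0 ∨ PySem.Int.bxor b r0 = 1 := bxor_01 hb hr0
    -- unfold one outer iteration
    rw [List.length_cons, List.range_succ_eq_map, List.foldl_cons, List.foldl_map, hreg]
    simp only [Nat.succ_eq_add_one]
    -- B's one step
    have hBs : ∀ (hd : Int) (r' : List Int),
        BfireBody (r0 :: rs) b = r' → r'.length = 10 → is01 r' →
        ∃ junk : List Int, junk.length = bs.length + 1 ∧
          (List.range bs.length).foldl (fun reg i => AfireBody reg (i + 1))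
              (hd :: overlay r' (bs ++ List.replicate 10 0))
            = junk ++ (b :: bs).foldl BfireBody (r0 :: rs) := by
      intro hd r' hB hlen' h01r'
      rw [outer_peel]
      obtain ⟨junk, hjl, hj⟩ := ih r' hlen' h01bs' h01r'
      refine ⟨hd :: junk, by simp [hjl], ?_⟩
      rw [hj]
      show _ = hd :: junk ++ bs.foldl BfireBody (BfireBody (r0 :: rs) b)
      rw [hB, List.cons_append]
    rcases hc01 with hc | hc
    · -- feedback 0: A leaves the register alone, B shifts in a 0
      have hA : AfireBody (PySem.Int.bxor b r0 :: overlay rs (bs ++ List.replicate 10 0)) 0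
          = PySem.Int.bxor b r0 :: overlay rs (bs ++ List.replicate 10 0) := by
        unfold AfireBody
        rw [if_neg]
        rw [List.getD_cons_zero, hc]
        decide
      rw [hA, ← overlay_append_zero rs (bs ++ List.replicate 10 0) (by simp [hrs])]
      refine hBs _ (rs ++ [0]) ?_ (by simp [hrs]) (is01_append h01rs (by unfold is01; decide))
      unfold BfireBody
      dsimp only
      rw [List.getD_cons_zero, hc, if_neg (by decide)]
      rfl
    · -- feedback 1: A xors g into the next 11 cells, B shifts and applies the taps
      have hA : AfireBody (PySem.Int.bxor b r0 :: overlay rs (bs ++ List.replicate 10 0)) 0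
          = PySem.Int.bxor b (PySem.Int.bxor 1 r0)
              :: overlay (overlay rs pvTaps) (bs ++ List.replicate 10 0) := by
        unfold AfireBody
        rw [if_pos (by rw [List.getD_cons_zero, hc]; decide)]
        simp only [Nat.zero_add]
        rw [inner_fold_range pvG.length _ le_rfl
            (by rw [← hreg, length_overlay]; simp [pvG])]
        rw [List.take_length, ← hreg]
        rw [overlay_overlay (r0 :: rs) pvG ((b :: bs) ++ List.replicate 10 0)
            (by unfold is01 pvG; decide) h01r
            (fun z hz => by
              rcases List.mem_cons.mp hz with h | h
              · exact h ▸ hb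
              · exact h01X z h)
            (by simp [pvG]; omega)]
        rfl
      rw [hA]
      refine hBs _ (overlay rs pvTaps) ?_ ?_
        (is01_overlay h01rs (by unfold is01 pvTaps; decide))
      · unfold BfireBody
        dsimp only
        rw [List.getD_cons_zero, hc, if_pos (by decide)]
        show List.zipWith (fun x t => PySem.Int.bxor x t) (rs ++ [0]) pvTaps = _
        exact zipWith_bxor_eq_overlay rs pvTaps (by simp [hrs, pvTaps])
      · rw [length_overlay]; simp [pvTaps]

lemma fire_eq (bits : List Int) (h : is01 bits) : fire_code bits = bits ++ fire_lfsr bits := by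
  rw [fire_code_def, fire_lfsr_def]
  obtain ⟨junk, hjl, hj⟩ := fire_loop bits (List.replicate 10 0) (by simp) h
    (fun z hz => Or.inl (List.eq_of_mem_replicate hz))
  rw [show bits ++ List.replicate 10 0
        = overlay (List.replicate 10 0) (bits ++ List.replicate 10 0) from (overlay_zeros _ _).symm]
  rw [hj, PySem.List.slice_from_neg_ofNat _ 10 (by norm_num)]
  have hlenB : (List.foldl BfireBody (List.replicate 10 0) bits).length = 10 :=
    Bfold_length bits _ (by simp)
  have hdrop : (junk ++ List.foldl BfireBody (List.replicate 10 0) bits).length - 10 = junk.length := by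
    rw [List.length_append, hlenB]
    omega
  rw [hdrop, List.drop_left]

-- convolutional encoder: value of the 5-bit shift register (newest bit = bit 0)
def val5 : List Int → Int
  | a :: b :: c :: d :: e :: _ => a + 2 * b + 4 * c + 8 * d + 16 * e
  | _ => 0

lemma conv_loop : ∀ (xs sh enc : List Int), sh.length = 5 → is01 sh → is01 xs →
    (xs.foldl AconvBody (sh, enc)).2 = (xs.foldl BconvBody (val5 sh, enc)).2 := by
  intro xs
  induction xs with
  | nil => intro sh enc _ _ _; rfl
  | cons b xs ih =>
    intro sh enc hlen h01sh h01xs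
    obtain ⟨s0, s1, s2, s3, s4, rfl⟩ : ∃ s0 s1 s2 s3 s4, sh = [s0, s1, s2, s3, s4] := by
      cases sh with
      | nil => simp at hlen
      | cons s0 t => cases t with
        | nil => simp at hlen
        | cons s1 t => cases t with
          | nil => simp at hlen
          | cons s2 t => cases t with
            | nil => simp at hlen
            | cons s3 t => cases t with
              | nil => simp at hlen
              | cons s4 t => cases t with
                | nil => exact ⟨_, _, _, _, _, rfl⟩
                | cons s5 t => simp at hlen
    have hb : b = 0 ∨ b = 1 := h01xs b (by simp)
    have hs0 : s0 = 0 ∨ s0 = 1 := h01sh s0 (by simp)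
    have hs1 : s1 = 0 ∨ s1 = 1 := h01sh s1 (by simp)
    have hs2 : s2 = 0 ∨ s2 = 1 := h01sh s2 (by simp)
    have hs3 : s3 = 0 ∨ s3 = 1 := h01sh s3 (by simp)
    have hs4 : s4 = 0 ∨ s4 = 1 := h01sh s4 (by simp)
    have key1 : PySem.Int.mod (val5 [s0, s1, s2, s3, s4] * 2 + b) 32 = val5 [b, s0, s1, s2, s3] := by
      rcases hb with rfl | rfl <;> rcases hs0 with rfl | rfl <;> rcases hs1 with rfl | rfl <;>
        rcases hs2 with rfl | rfl <;> rcases hs3 with rfl | rfl <;> rcases hs4 with rfl | rfl <;> decide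
    have key2 : pvOut0.getD (val5 [b, s0, s1, s2, s3]).toNat 0 = gsm_parity [b, s0, s1, s2, s3] 91 := by
      rcases hb with rfl | rfl <;> rcases hs0 with rfl | rfl <;> rcases hs1 with rfl | rfl <;>
        rcases hs2 with rfl | rfl <;> rcases hs3 with rfl | rfl <;> decide
    have key3 : pvOut1.getD (val5 [b, s0, s1, s2, s3]).toNat 0 = gsm_parity [b, s0, s1, s2, s3] 121 := by
      rcases hb with rfl | rfl <;> rcases hs0 with rfl | rfl <;> rcases hs1 with rfl | rfl <;>
        rcases hs2 with rfl | rfl <;> rcases hs3 with rfl | rfl <;> decide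
    simp only [List.foldl_cons]
    have hA : AconvBody ([s0, s1, s2, s3, s4], enc) b
        = ([b, s0, s1, s2, s3],
           enc ++ [gsm_parity [b, s0, s1, s2, s3] 91, gsm_parity [b, s0, s1, s2, s3] 121]) := rfl
    have hB : BconvBody (val5 [s0, s1, s2, s3, s4], enc) b
        = (val5 [b, s0, s1, s2, s3],
           enc ++ [gsm_parity [b, s0, s1, s2, s3] 91, gsm_parity [b, s0, s1, s2, s3] 121]) := by
      unfold BconvBody
      dsimp only
      rw [key1, key2, key3]
    rw [hA, hB]
    exact ih [b, s0, s1, s2, s3] _ rfl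
      (fun z hz => by
        have hz' : z = b ∨ z = s0 ∨ z = s1 ∨ z = s2 ∨ z = s3 := by simpa using hz
        rcases hz' with rfl | rfl | rfl | rfl | rfl
        · exact hb
        · exact hs0
        · exact hs1
        · exact hs2
        · exact hs3)
      (fun z hz => h01xs z (by simp [hz]))

lemma conv_eq (bits : List Int) (h : is01 bits) : gsm_conv_encode bits = conv_table bits := by
  rw [gsm_conv_encode_def, conv_table_def]
  have h4 : is01 (bits ++ [0, 0, 0, 0]) := is01_append h (by unfold is01; decide)
  have := conv_loop (bits ++ [0, 0, 0, 0]) [0, 0, 0, 0, 0] [] rfl (by unfold is01; decide) h4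
  rwa [show val5 [0, 0, 0, 0, 0] = (0 : Int) from rfl] at this

-- pad/truncate: A's conditional pad then [:148] equals B's single padded slice
lemma burst_eq : ∀ (X : List Int),
    (if X.length < 148 then X ++ List.replicate (148 - X.length) 0 else X).take 148
      = (X ++ List.replicate 148 0).take 148 := by
  intro X
  split_ifs with h
  · rw [List.take_of_length_le (by simp; omega),
        List.take_append, List.take_of_length_le (by omega), List.take_replicate]
    congr 2
    omega
  · rw [List.take_append, List.take_replicate,
        show 148 - X.length = 0 from by omega]
    simp

-- the whole tail of both pipelines, given the (shared) info bits
lemma pipeline_eq (info : List Int) (h : is01 info) :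
    List.take 148
      (if (([0, 0, 0] : List Int) ++ gsm_conv_encode (fire_code info)).length < 148
       then ([0, 0, 0] : List Int) ++
            (gsm_conv_encode (fire_code info) ++
             List.replicate (148 - (([0, 0, 0] : List Int) ++ gsm_conv_encode (fire_code info)).length) 0)
       else ([0, 0, 0] : List Int) ++ gsm_conv_encode (fire_code info))
    = List.take 148
        (([0, 0, 0] : List Int) ++ (conv_table (info ++ fire_lfsr info) ++ List.replicate 148 0)) := by
  have hfire01 : is01 (info ++ fire_lfsr info) := by
    refine is01_append h ?_
    rw [fire_lfsr_def]
    exact Bfold_is01 info _ h (fun z hz => Or.inl (List.eq_of_mem_replicate hz))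
  rw [fire_eq info h, conv_eq _ hfire01]
  simp only [← List.append_assoc]
  exact burst_eq _

-- ===== VERDICT (by name: the statement is the Claim_ definition above) =====
set_option maxRecDepth 8192 in
set_option maxHeartbeats 1000000 in
theorem build_sch_spec : Claim_equal_build_sch := by
  intro FN BSIC _
  show build_sch FN BSIC = build_sch_alt FN BSIC
  simp only [build_sch, build_sch_alt, List.append_assoc]
  exact pipeline_eq _
    (is01_append (is01_map_pvBit _ _)
      (is01_append (is01_map_pvBit _ _)
        (is01_append (is01_map_pvBit _ _) (is01_map_pvBit _ _))))
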